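-- pv_equiv track=rewrite | github.com/JohnBurp/Python | OOO.py | parenHelper
-- ===== SOURCE A (Python) =====
-- def parenHelper(arry):
--     newarry = []
--     for x in range(len(arry) - 1):
--         if arry[x] == "(":
--             start = x
--             for i in range(start + 1, len(arry)):
--                 newarry.append(arry[i])
--             newarry = parenHelper(newarry)
--             return newarry
--     return arry
-- ===== SOURCE B (Python) =====
-- def parenHelper(arry):
--     for i in range(len(arry) - 2, -1, -1):
--         if arry[i] == "(":
--             return arry[i + 1:]
--     return arry
-- ===== Notes on version B (the rewrite author's own statement) =====
-- stated objective: simpler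
-- what changed: Replaced A's recursive drop-through-first-'(' (which re-copies the suffix element by element and recurses) by a single backward scan for the last '(' at a non-final position followed by one slice.
import Mathlib
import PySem

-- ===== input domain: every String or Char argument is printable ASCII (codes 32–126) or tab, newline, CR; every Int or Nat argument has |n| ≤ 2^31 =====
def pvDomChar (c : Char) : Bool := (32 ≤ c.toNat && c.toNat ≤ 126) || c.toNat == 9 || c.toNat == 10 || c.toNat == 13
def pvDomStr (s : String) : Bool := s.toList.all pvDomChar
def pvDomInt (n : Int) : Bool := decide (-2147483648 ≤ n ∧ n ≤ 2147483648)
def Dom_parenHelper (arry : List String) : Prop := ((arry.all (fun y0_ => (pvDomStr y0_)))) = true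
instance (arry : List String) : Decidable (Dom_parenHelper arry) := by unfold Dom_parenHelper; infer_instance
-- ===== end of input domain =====

-- B replaces A's recursive drop-after-first-'(' by one backward scan and one slice (simpler).

-- ===== PORT A =====
-- outer loop 'for x in range(len(arry)-1): if arry[x] == "(" …' as an index scan
def pvFindOpen (arry : List String) (x : Nat) : Option Nat :=
  if h : x < arry.length - 1 then
    if PySem.List.pyGetD arry (x : Int) "" = "(" then some x
    else pvFindOpen arry (x + 1)
  else none
termination_by arry.length - x

-- used by parenHelper's decreasing_by (the recursive call's argument is a proper suffix)
theorem pvFindOpen_some_lt (arry : List String) (x y : Nat)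
    (h : pvFindOpen arry x = some y) : y + 1 < arry.length := by
  fun_induction pvFindOpen arry x with
  | case1 x h1 h2 => simp_all; omega
  | case2 x h1 h2 ih => exact ih h
  | case3 x h1 => simp_all

-- the inner append loop builds exactly the suffix (used by decreasing_by)
theorem pvBuild_eq_drop (l : List String) (x : Nat) :
    (PySem.List.pyRange ((x : Int) + 1) (l.length : Int) 1).foldl
      (fun acc i => acc ++ [PySem.List.pyGetD l i ""]) [] = l.drop (x + 1) := by
  have h := PySem.List.foldl_pyRange_pyGetD (a := (x : Int) + 1) (xs := l) (d := "")
    (f := fun acc v => acc ++ [v]) (init := ([] : List String)) (by omega)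
  rw [show ((x : Int) + 1).toNat = x + 1 from by omega,
      PySem.List.foldl_append_singleton, List.nil_append] at h
  exact h

def parenHelper (arry : List String) : List String :=
  match hf : pvFindOpen arry 0 with
  | none => arry
  | some x =>
      -- newarry = [arry[i] for i in range(x+1, len(arry))], then recurse
      parenHelper ((PySem.List.pyRange ((x : Int) + 1) (arry.length : Int) 1).foldl
        (fun acc i => acc ++ [PySem.List.pyGetD arry i ""]) [])
termination_by arry.length
decreasing_by
  rw [pvBuild_eq_drop]
  have := pvFindOpen_some_lt arry 0 x hf
  simp [List.length_drop]; omega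

-- ===== PORT B =====
-- 'for i in range(len(arry)-2, -1, -1): if arry[i] == "(": return arry[i+1:]' :
-- pvScanBack arry k checks indices k-1, k-2, …, 0
def pvScanBack (arry : List String) : Nat → List String
  | 0 => arry
  | j + 1 =>
      if PySem.List.pyGetD arry (j : Int) "" = "(" then
        PySem.List.slice arry (some ((j : Int) + 1)) none
      else pvScanBack arry j

def parenHelper_alt (arry : List String) : List String :=
  pvScanBack arry (arry.length - 1)

-- ===== PRECONDITION & SPEC =====
def Spec_parenHelper (arry : List String) (out : List String) : Prop := out = parenHelper_alt arry
instance (arry : List String) (out : List String) : Decidable (Spec_parenHelper arry out) := by unfold Spec_parenHelper; infer_instance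

-- ===== CLAIM (what is proved, stated in full; the proofs are below) =====
def Claim_equal_parenHelper : Prop := ∀ (arry : List String), Dom_parenHelper arry → Spec_parenHelper arry (parenHelper arry)

-- ===== LEMMAS AND PROOFS =====

theorem pvFindOpen_none (arry : List String) (x : Nat)
    (h : pvFindOpen arry x = none) :
    ∀ j, x ≤ j → j + 1 < arry.length → arry.getD j "" ≠ "(" := by
  fun_induction pvFindOpen arry x with
  | case1 x h1 h2 => simp_all
  | case2 x h1 h2 ih =>
      intro j hxj hj
      rcases Nat.eq_or_lt_of_le hxj with rfl | hlt
      · simpa using h2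
      · exact ih h j hlt hj
  | case3 x h1 =>
      intro j hxj hj; omega

theorem pvFindOpen_some (arry : List String) (x y : Nat)
    (h : pvFindOpen arry x = some y) : arry.getD y "" = "(" := by
  fun_induction pvFindOpen arry x with
  | case1 x h1 h2 => simp_all
  | case2 x h1 h2 ih => exact ih h
  | case3 x h1 => simp_all

theorem pvScanBack_no_open (l : List String) (k : Nat)
    (h : ∀ j, j < k → l.getD j "" ≠ "(") : pvScanBack l k = l := by
  induction k with
  | zero => rfl
  | succ j ih =>
      simp only [pvScanBack, PySem.List.pyGetD_natCast]
      rw [if_neg (h j (by omega))]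
      exact ih (fun j' hj' => h j' (by omega))

theorem pvScanBack_shift (l : List String) (d : Nat) (hd : 1 ≤ d)
    (hopen : l.getD (d - 1) "" = "(") :
    ∀ k, pvScanBack l (k + d) = pvScanBack (l.drop d) k := by
  intro k
  induction k with
  | zero =>
      obtain ⟨e, rfl⟩ : ∃ e, d = e + 1 := ⟨d - 1, by omega⟩
      rw [Nat.zero_add]
      simp only [pvScanBack, PySem.List.pyGetD_natCast]
      rw [if_pos (by simpa using hopen)]
      have : ((e : Int) + 1) = ((e + 1 : Nat) : Int) := by push_cast; ring
      rw [this, PySem.List.slice_from_natCast]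
  | succ j ih =>
      have hidx : (l.drop d).getD j "" = l.getD (j + d) "" := by
        simp [List.getD_eq_getElem?_getD, List.getElem?_drop, Nat.add_comm d j]
      simp only [Nat.succ_add, pvScanBack, PySem.List.pyGetD_natCast, hidx]
      split_ifs with hc
      · have : ((j : Int) + d + 1) = ((j + d + 1 : Nat) : Int) := by push_cast; ring
        rw [show ((j + d : Nat) : Int) + 1 = ((j + d + 1 : Nat) : Int) by push_cast; ring,
            show ((j : Nat) : Int) + 1 = ((j + 1 : Nat) : Int) by push_cast; ring]
        rw [PySem.List.slice_from_natCast, PySem.List.slice_from_natCast, List.drop_drop]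
        congr 1; omega
      · exact ih

theorem parenHelper_eq_alt (l : List String) : parenHelper l = parenHelper_alt l := by
  induction l using (fun motive ind l => Nat.strongRecOn (motive := fun n => ∀ l : List String, l.length = n → motive l) l.length
    (fun n ih l hl => ind l (fun l' hl' => ih l'.length (hl ▸ hl') l' rfl)) l rfl :
    ∀ (motive : List String → Prop),
      (∀ l, (∀ l', l'.length < l.length → motive l') → motive l) → ∀ l, motive l) with
  | _ l ih =>
    rw [parenHelper]
    split
    · next hf =>
        -- no '(' below the last index: B's backward scan also finds nothing
        rw [parenHelper_alt]
        exact (pvScanBack_no_open l (l.length - 1)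
          (fun j hj => pvFindOpen_none l 0 hf j (by omega) (by omega))).symm
    · next x hf =>
        rw [pvBuild_eq_drop]
        have hlt := pvFindOpen_some_lt l 0 x hf
        rw [ih (l.drop (x + 1)) (by simp; omega)]
        rw [parenHelper_alt, parenHelper_alt]
        have hshift := pvScanBack_shift l (x + 1) (by omega)
          (by simpa using pvFindOpen_some l 0 x hf) (l.length - 1 - (x + 1))
        rw [show l.length - 1 - (x + 1) + (x + 1) = l.length - 1 by omega] at hshift
        rw [hshift]
        congr 1
        simp [List.length_drop]; omega

-- ===== VERDICT (by name: the statement is the Claim_ definition above) =====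
theorem parenHelper_spec : Claim_equal_parenHelper := by
  intro arry _
  unfold Spec_parenHelper
  exact parenHelper_eq_alt arry
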